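-- pv_equiv track=rewrite | github.com/daniel-reich/ubiquitous-fiesta | vfuZia9ufckGzhGZh_3.py | seq_level
-- ===== SOURCE A (Python) =====
-- def seq_level(lst):
--   a = [lst[i+1] - lst[i] for i in range(len(lst)-1)]
--   if a[0]==a[-1]:
--     return "Linear"
--   elif seq_level(a) == "Linear":
--     return "Quadratic"
--   elif seq_level(a) == "Quadratic":
--     return "Cubic"
-- ===== SOURCE B (Python) =====
-- def seq_level(lst):
--     cur = lst
--     for label in ("Linear", "Quadratic", "Cubic"):
--         a = [y - x for x, y in zip(cur, cur[1:])]
--         if a[0] == a[-1]: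
--             return label
--         cur = a
--     return None
-- ===== Notes on version B (the rewrite author's own statement) =====
-- stated objective: faster
-- what changed: Replaces A's self-recursion, which evaluates seq_level(a) twice per level (exponential blow-up on deep difference sequences), with one explicit loop over the three labels that keeps the current difference list and tests its endpoints.
import Mathlib
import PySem

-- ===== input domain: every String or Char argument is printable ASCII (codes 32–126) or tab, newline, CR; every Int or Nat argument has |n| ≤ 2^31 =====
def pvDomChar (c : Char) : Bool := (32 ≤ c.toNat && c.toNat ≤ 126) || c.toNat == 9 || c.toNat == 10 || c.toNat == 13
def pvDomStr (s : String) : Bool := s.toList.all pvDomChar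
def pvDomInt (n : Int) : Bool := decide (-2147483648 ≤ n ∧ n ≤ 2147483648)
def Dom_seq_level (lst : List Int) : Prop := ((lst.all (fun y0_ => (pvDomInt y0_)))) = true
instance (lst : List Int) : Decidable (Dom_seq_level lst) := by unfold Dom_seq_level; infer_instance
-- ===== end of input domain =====

-- B replaces A's double self-recursion with one explicit loop over the three labels; return value only.

-- ===== PORT A =====
-- a = [lst[i+1] - lst[i] for i in range(len(lst)-1)]
def pvDiffsA (lst : List Int) : List Int :=
  (PySem.List.pyRange 0 ((lst.length : Int) - 1) 1).map
    (fun i => (PySem.List.pyGetD lst (i + 1) 0) - (PySem.List.pyGetD lst i 0))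

theorem pvDiffsA_length (lst : List Int) : (pvDiffsA lst).length = lst.length - 1 := by
  simp [pvDiffsA, PySem.List.length_pyRange_one]

def seq_level (lst : List Int) : Option String :=
  let a := pvDiffsA lst
  if h : a = [] then none  -- a[0] raises IndexError (outside Pre_)
  else if (PySem.List.pyGetD a 0 0) = (PySem.List.pyGetD a (-1) 0) then some "Linear"
  else if seq_level a = some "Linear" then some "Quadratic"
  else if seq_level a = some "Quadratic" then some "Cubic"
  else none
termination_by lst.length
decreasing_by
  all_goals
    have hl := pvDiffsA_length lst
    have : pvDiffsA lst ≠ [] := h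
    have : (pvDiffsA lst).length ≠ 0 := by simpa [List.length_eq_zero_iff] using this
    omega

-- ===== PORT B =====
-- a = [y - x for x, y in zip(cur, cur[1:])]
def pvDiffsB (cur : List Int) : List Int :=
  List.zipWith (fun x y => y - x) cur cur.tail

-- the for-loop over the three labels, carrying the current difference list
def pvLoop : List String → List Int → Option String
  | [], _ => none
  | label :: rest, cur =>
    match pvDiffsB cur with
    | [] => none  -- a[0] raises IndexError (outside Pre_)
    | x :: xs => if x = (x :: xs).getLast (List.cons_ne_nil x xs) then some label
                 else pvLoop rest (x :: xs)

def seq_level_alt (lst : List Int) : Option String :=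
  pvLoop ["Linear", "Quadratic", "Cubic"] lst

-- ===== PRECONDITION & SPEC =====
-- Pre_ excludes lists of length 0 or 1, on which both A and B raise IndexError (a[0] of an empty list).
def Pre_seq_level (lst : List Int) : Prop := 2 ≤ lst.length
instance (lst : List Int) : Decidable (Pre_seq_level lst) := by unfold Pre_seq_level; infer_instance
def pvWitness_seq_level : List Int := [1, 2, 4]

def Spec_seq_level (lst : List Int) (out : Option String) : Prop := out = seq_level_alt lst
instance (lst : List Int) (out : Option String) : Decidable (Spec_seq_level lst out) := by unfold Spec_seq_level; infer_instance

-- ===== CLAIM (what is proved, stated in full; the proofs are below) =====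
def Claim_equal_seq_level : Prop := ∀ (lst : List Int), Dom_seq_level lst → Pre_seq_level lst → Spec_seq_level lst (seq_level lst)

-- ===== LEMMAS AND PROOFS =====

-- the two comprehensions build the same difference list
theorem pvDiffs_eq (lst : List Int) : pvDiffsA lst = pvDiffsB lst := by
  apply List.ext_getElem
  · simp [pvDiffsA_length, pvDiffsB]
  · intro i h1 h2
    have hi : i < lst.length - 1 := by rw [pvDiffsA_length] at h1; exact h1
    have h1' : (i : Int) < (lst.length : Int) - 1 := by omega
    simp only [pvDiffsA, pvDiffsB, PySem.List.pyRange_one]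
    rw [List.getElem_map, List.getElem_map, List.getElem_range]
    rw [List.getElem_zipWith, List.getElem_tail]
    rw [PySem.List.pyGetD_eq_getElem _ _ (by omega) (by omega),
        PySem.List.pyGetD_eq_getElem _ _ (by omega) (by omega)]
    norm_num

-- endpoint test: A's pyGetD form vs B's head/getLast form
theorem endpt_iff (x : Int) (xs : List Int) :
    (PySem.List.pyGetD (x :: xs) 0 0 = PySem.List.pyGetD (x :: xs) (-1) 0) ↔
      x = (x :: xs).getLast (List.cons_ne_nil x xs) := by
  rw [PySem.List.pyGetD_zero_cons, PySem.List.pyGetD_neg_one (x :: xs) 0 (List.cons_ne_nil x xs)]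

theorem diffs_ne_nil (a : List Int) (h : 2 ≤ a.length) : pvDiffsA a ≠ [] := by
  have := pvDiffsA_length a
  intro hn
  rw [hn] at this
  simp at this
  omega

-- when the endpoints differ the list has at least two entries
theorem two_le_of_ne (x : Int) (xs : List Int)
    (h : ¬ x = (x :: xs).getLast (List.cons_ne_nil x xs)) : 2 ≤ (x :: xs).length := by
  cases xs with
  | nil => simp at h
  | cons y ys => simp

-- one-step unfolding of A's recursion when the difference list is nonempty
theorem seq_level_cons (a : List Int) (x : Int) (xs : List Int) (h : pvDiffsA a = x :: xs) :
    seq_level a =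
      if (PySem.List.pyGetD (x :: xs) 0 0 = PySem.List.pyGetD (x :: xs) (-1) 0) then some "Linear"
      else if seq_level (x :: xs) = some "Linear" then some "Quadratic"
      else if seq_level (x :: xs) = some "Quadratic" then some "Cubic"
      else none := by
  rw [seq_level, h]
  rw [dif_neg (List.cons_ne_nil x xs)]

-- one-step unfolding of B's loop when the difference list is nonempty
theorem pvLoop_cons (label : String) (rest : List String) (cur : List Int)
    (x : Int) (xs : List Int) (h : pvDiffsB cur = x :: xs) :
    pvLoop (label :: rest) cur =
      if x = (x :: xs).getLast (List.cons_ne_nil x xs) then some label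
      else pvLoop rest (x :: xs) := by
  rw [pvLoop, h]

theorem linear_iff (a : List Int) (x : Int) (xs : List Int) (h : pvDiffsA a = x :: xs) :
    (seq_level a = some "Linear") ↔ x = (x :: xs).getLast (List.cons_ne_nil x xs) := by
  rw [seq_level_cons a x xs h]
  by_cases he : PySem.List.pyGetD (x :: xs) 0 0 = PySem.List.pyGetD (x :: xs) (-1) 0
  · rw [if_pos he]
    exact iff_of_true rfl ((endpt_iff x xs).mp he)
  · rw [if_neg he]
    constructor
    · intro hc
      exfalso; split at hc <;> simp at hc
    · intro hg
      exact absurd ((endpt_iff x xs).mpr hg) he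

theorem quadratic_iff (a : List Int) (x : Int) (xs : List Int) (h : pvDiffsA a = x :: xs)
    (hne : ¬ x = (x :: xs).getLast (List.cons_ne_nil x xs)) :
    (seq_level a = some "Quadratic") ↔ seq_level (x :: xs) = some "Linear" := by
  rw [seq_level_cons a x xs h, if_neg (fun hc => hne ((endpt_iff x xs).mp hc))]
  by_cases hl : seq_level (x :: xs) = some "Linear"
  · rw [if_pos hl]
    exact iff_of_true rfl hl
  · rw [if_neg hl]
    constructor
    · intro hc
      exfalso; split at hc <;> simp at hc
    · intro hc
      exact absurd hc hl

theorem main_eq (lst : List Int) (h : 2 ≤ lst.length) :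
    seq_level lst = seq_level_alt lst := by
  unfold seq_level_alt
  have h1 : pvDiffsA lst ≠ [] := diffs_ne_nil lst h
  obtain ⟨x1, xs1, ha1⟩ := List.exists_cons_of_ne_nil h1
  have hb1 : pvDiffsB lst = x1 :: xs1 := by rw [← pvDiffs_eq, ha1]
  rw [seq_level_cons lst x1 xs1 ha1, pvLoop_cons _ _ _ _ _ hb1]
  by_cases he1 : x1 = (x1 :: xs1).getLast (List.cons_ne_nil x1 xs1)
  · rw [if_pos ((endpt_iff x1 xs1).mpr he1), if_pos he1]
  · rw [if_neg (fun hc => he1 ((endpt_iff x1 xs1).mp hc)), if_neg he1]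
    -- level 2
    have h2n : pvDiffsA (x1 :: xs1) ≠ [] := diffs_ne_nil _ (two_le_of_ne x1 xs1 he1)
    obtain ⟨x2, xs2, ha2⟩ := List.exists_cons_of_ne_nil h2n
    have hb2 : pvDiffsB (x1 :: xs1) = x2 :: xs2 := by rw [← pvDiffs_eq, ha2]
    rw [pvLoop_cons _ _ _ _ _ hb2]
    by_cases he2 : x2 = (x2 :: xs2).getLast (List.cons_ne_nil x2 xs2)
    · rw [if_pos ((linear_iff _ x2 xs2 ha2).mpr he2), if_pos he2]
    · rw [if_neg (fun hc => he2 ((linear_iff _ x2 xs2 ha2).mp hc)), if_neg he2]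
      -- level 3
      have h3n : pvDiffsA (x2 :: xs2) ≠ [] := diffs_ne_nil _ (two_le_of_ne x2 xs2 he2)
      obtain ⟨x3, xs3, ha3⟩ := List.exists_cons_of_ne_nil h3n
      have hb3 : pvDiffsB (x2 :: xs2) = x3 :: xs3 := by rw [← pvDiffs_eq, ha3]
      rw [pvLoop_cons _ _ _ _ _ hb3]
      by_cases he3 : x3 = (x3 :: xs3).getLast (List.cons_ne_nil x3 xs3)
      · have hq : seq_level (x1 :: xs1) = some "Quadratic" :=
          (quadratic_iff _ x2 xs2 ha2 he2).mpr ((linear_iff _ x3 xs3 ha3).mpr he3)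
        rw [if_pos hq, if_pos he3]
      · have hnq : seq_level (x1 :: xs1) ≠ some "Quadratic" := fun hc =>
          he3 ((linear_iff _ x3 xs3 ha3).mp ((quadratic_iff _ x2 xs2 ha2 he2).mp hc))
        rw [if_neg hnq, if_neg he3, pvLoop]

-- ===== VERDICT (by name: the statement is the Claim_ definition above) =====
theorem seq_level_spec : Claim_equal_seq_level := by
  intro lst _ hpre
  unfold Spec_seq_level
  exact main_eq lst hpre
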